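-- pv_equiv track=rewrite | github.com/NeelJVerma/Kattis_Solutions | Rational_Sequence_Take_3/rationalsequence3.py | compute_nth
-- ===== SOURCE A (Python) =====
-- def compute_nth(n):
--     goal = n
--     path = [goal]
--
--     while goal > 1:
--         goal //= 2
--         path.append(goal)
--
--     p = q = 1
--
--     for i in range(len(path) - 2, -1, -1):
--         if path[i] & 1 == 1:
--             q += p
--         else:
--             p += q
--
--     return (q, p)
-- ===== SOURCE B (Python) =====
-- def compute_nth(n):
--     if n <= 1:
--         return (1, 1)
--     q, p = compute_nth(n // 2)
--     if n & 1:
--         q += p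
--     else:
--         p += q
--     return (q, p)
-- ===== Notes on version B (the rewrite author's own statement) =====
-- stated objective: simpler
-- what changed: Replaces the explicit halving-path list plus a reverse index loop with a direct recursion on the halved argument that applies the lowest bit after the recursive call, so no path list is ever built.
import Mathlib
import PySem

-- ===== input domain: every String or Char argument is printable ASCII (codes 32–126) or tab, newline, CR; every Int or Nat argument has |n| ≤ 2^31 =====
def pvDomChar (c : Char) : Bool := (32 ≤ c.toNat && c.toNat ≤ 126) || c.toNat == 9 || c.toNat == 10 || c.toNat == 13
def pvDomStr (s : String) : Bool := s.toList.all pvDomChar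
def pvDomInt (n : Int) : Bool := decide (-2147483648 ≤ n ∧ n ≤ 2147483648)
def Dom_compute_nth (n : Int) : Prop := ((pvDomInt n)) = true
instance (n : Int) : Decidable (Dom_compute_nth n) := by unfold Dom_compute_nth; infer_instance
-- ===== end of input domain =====

-- B replaces A's explicit halving-path list and reverse index loop by a direct
-- recursion on n // 2 that applies the lowest bit after the recursive call (simpler; no list built).

-- ===== PORT A =====
-- the while loop: goal //= 2; path.append(goal)
def pvLoopA (goal : Int) (path : List Int) : List Int :=
  if _h : 1 < goal then
    pvLoopA (PySem.Int.floordiv goal 2) (path ++ [PySem.Int.floordiv goal 2])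
  else path
termination_by goal.toNat
decreasing_by
  have h2 : PySem.Int.floordiv goal 2 = goal / 2 := PySem.Int.floordiv_eq_ediv_of_pos (by omega)
  simp only [h2]; omega

def compute_nth (n : Int) : Int × Int :=
  let path := pvLoopA n [n]
  (PySem.List.pyRange ((path.length : Int) - 2) (-1) (-1)).foldl
    (fun (qp : Int × Int) i =>
      if PySem.Int.band (PySem.List.pyGetD path i 0) 1 == 1 then (qp.1 + qp.2, qp.2)
      else (qp.1, qp.2 + qp.1))
    (1, 1)

-- ===== PORT B =====
def compute_nth_alt (n : Int) : Int × Int :=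
  if _h : n ≤ 1 then (1, 1)
  else
    let qp := compute_nth_alt (PySem.Int.floordiv n 2)
    if PySem.Int.band n 1 == 1 then (qp.1 + qp.2, qp.2) else (qp.1, qp.2 + qp.1)
termination_by n.toNat
decreasing_by
  have h2 : PySem.Int.floordiv n 2 = n / 2 := PySem.Int.floordiv_eq_ediv_of_pos (by omega)
  simp only [h2]; omega

-- ===== PRECONDITION & SPEC =====
def Spec_compute_nth (n : Int) (out : Int × Int) : Prop := out = compute_nth_alt n
instance (n : Int) (out : Int × Int) : Decidable (Spec_compute_nth n out) := by unfold Spec_compute_nth; infer_instance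

-- ===== CLAIM (what is proved, stated in full; the proofs are below) =====
def Claim_equal_compute_nth : Prop := ∀ (n : Int), Dom_compute_nth n → Spec_compute_nth n (compute_nth n)

-- ===== LEMMAS AND PROOFS =====

theorem pvLoopA_stop (g : Int) (h : ¬ 1 < g) (acc : List Int) : pvLoopA g acc = acc := by
  rw [pvLoopA, dif_neg h]

theorem pvLoopA_step (g : Int) (h : 1 < g) (acc : List Int) :
    pvLoopA g acc = pvLoopA (PySem.Int.floordiv g 2) (acc ++ [PySem.Int.floordiv g 2]) := by
  rw [pvLoopA, dif_pos h]

theorem pvLoopA_acc : ∀ (k : Nat) (g : Int), g.toNat ≤ k → ∀ (acc : List Int),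
    pvLoopA g acc = acc ++ pvLoopA g [] := by
  intro k
  induction k with
  | zero =>
    intro g hg acc
    rw [pvLoopA_stop g (by omega), pvLoopA_stop g (by omega)]
    simp
  | succ k ih =>
    intro g hg acc
    by_cases h : 1 < g
    · have h2 : PySem.Int.floordiv g 2 = g / 2 := PySem.Int.floordiv_eq_ediv_of_pos (by omega)
      have hle : (PySem.Int.floordiv g 2).toNat ≤ k := by rw [h2]; omega
      rw [pvLoopA_step g h acc, pvLoopA_step g h []]
      rw [ih _ hle, ih _ hle ([] ++ [PySem.Int.floordiv g 2])]
      simp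
    · rw [pvLoopA_stop g h, pvLoopA_stop g h]
      simp

theorem pathA_rec (n : Int) (h : 1 < n) :
    pvLoopA n [n] = n :: pvLoopA (PySem.Int.floordiv n 2) [PySem.Int.floordiv n 2] := by
  rw [pvLoopA_step n h [n],
      pvLoopA_acc (PySem.Int.floordiv n 2).toNat _ le_rfl ([n] ++ [PySem.Int.floordiv n 2]),
      pvLoopA_acc (PySem.Int.floordiv n 2).toNat _ le_rfl [PySem.Int.floordiv n 2]]
  simp

theorem pathA_ne_nil (m : Int) : pvLoopA m [m] ≠ [] := by
  rw [pvLoopA_acc m.toNat m le_rfl [m]]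
  simp

-- range a .. 0 inclusive splits as range a .. 1 inclusive, then 0
theorem pyRange_split_zero : ∀ (k : Nat) (a : Int), a.toNat = k → 0 ≤ a →
    PySem.List.pyRange a (-1) (-1) = PySem.List.pyRange a 0 (-1) ++ [0] := by
  intro k
  induction k with
  | zero =>
    intro a hk ha
    have ha0 : a = 0 := by omega
    subst ha0
    rw [PySem.List.pyRange_neg_one_cons (by omega),
        PySem.List.pyRange_neg_one_eq_nil (by omega),
        PySem.List.pyRange_neg_one_eq_nil (by omega)]
    simp
  | succ k ih =>
    intro a hk ha
    rw [PySem.List.pyRange_neg_one_cons (by omega : (-1:Int) < a),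
        PySem.List.pyRange_neg_one_cons (by omega : (0:Int) < a),
        ih (a - 1) (by omega) (by omega)]
    simp

-- index-shift: folding over [k, …, 1] on (x :: xs) equals folding over [k-1, …, 0] on xs
theorem foldl_shift (x : Int) (xs : List Int) :
    ∀ (m : Nat) (k : Int), k.toNat = m →
    ∀ (s : Int × Int),
      (PySem.List.pyRange k 0 (-1)).foldl
        (fun (qp : Int × Int) i =>
          if PySem.Int.band (PySem.List.pyGetD (x :: xs) i 0) 1 == 1 then (qp.1 + qp.2, qp.2)
          else (qp.1, qp.2 + qp.1)) s =
      (PySem.List.pyRange (k - 1) (-1) (-1)).foldl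
        (fun (qp : Int × Int) i =>
          if PySem.Int.band (PySem.List.pyGetD xs i 0) 1 == 1 then (qp.1 + qp.2, qp.2)
          else (qp.1, qp.2 + qp.1)) s := by
  intro m
  induction m with
  | zero =>
    intro k hk s
    rw [PySem.List.pyRange_neg_one_eq_nil (by omega : k ≤ 0),
        PySem.List.pyRange_neg_one_eq_nil (by omega : k - 1 ≤ -1)]
    rfl
  | succ m ih =>
    intro k hk s
    rw [PySem.List.pyRange_neg_one_cons (by omega : (0:Int) < k),
        PySem.List.pyRange_neg_one_cons (by omega : (-1:Int) < k - 1)]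
    simp only [List.foldl_cons]
    have hget : PySem.List.pyGetD (x :: xs) k 0 = PySem.List.pyGetD xs (k - 1) 0 := by
      have hk1 : k = ((k - 1).toNat : Int) + 1 := by omega
      rw [hk1]
      rw [PySem.List.pyGetD, PySem.List.pyGetD, PySem.List.pyGet?_cons_succ]
      simp
    rw [hget, ih (k - 1) (by omega)]

theorem compute_nth_base (n : Int) (h : n ≤ 1) : compute_nth n = (1, 1) := by
  simp only [compute_nth, pvLoopA_stop n (by omega) [n]]
  rw [PySem.List.pyRange_neg_one_eq_nil (by norm_num)]
  rfl

theorem compute_nth_rec (n : Int) (h : 1 < n) :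
    compute_nth n =
      (if PySem.Int.band n 1 == 1
        then ((compute_nth (PySem.Int.floordiv n 2)).1 + (compute_nth (PySem.Int.floordiv n 2)).2,
              (compute_nth (PySem.Int.floordiv n 2)).2)
        else ((compute_nth (PySem.Int.floordiv n 2)).1,
              (compute_nth (PySem.Int.floordiv n 2)).2 + (compute_nth (PySem.Int.floordiv n 2)).1)) := by
  have hlen : 1 ≤ (pvLoopA (PySem.Int.floordiv n 2) [PySem.Int.floordiv n 2]).length :=
    List.length_pos_iff.mpr (pathA_ne_nil _)
  simp only [compute_nth, pathA_rec n h]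
  have hL : (((n :: pvLoopA (PySem.Int.floordiv n 2) [PySem.Int.floordiv n 2]).length : Int)) - 2
      = ((pvLoopA (PySem.Int.floordiv n 2) [PySem.Int.floordiv n 2]).length : Int) - 1 := by
    simp; omega
  rw [hL]
  rw [pyRange_split_zero (((pvLoopA (PySem.Int.floordiv n 2) [PySem.Int.floordiv n 2]).length : Int) - 1).toNat _
        rfl (by omega)]
  rw [List.foldl_append]
  rw [foldl_shift n _ (((pvLoopA (PySem.Int.floordiv n 2) [PySem.Int.floordiv n 2]).length : Int) - 1).toNat _
        (by omega)]
  have h2 : ((pvLoopA (PySem.Int.floordiv n 2) [PySem.Int.floordiv n 2]).length : Int) - 1 - 1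
      = ((pvLoopA (PySem.Int.floordiv n 2) [PySem.Int.floordiv n 2]).length : Int) - 2 := by ring
  rw [h2]
  simp only [List.foldl_cons, List.foldl_nil, PySem.List.pyGetD_zero_cons]

theorem main_aux : ∀ (k : Nat) (n : Int), n.toNat ≤ k → compute_nth n = compute_nth_alt n := by
  intro k
  induction k with
  | zero =>
    intro n hn
    rw [compute_nth_base n (by omega), compute_nth_alt, dif_pos (by omega : n ≤ 1)]
  | succ k ih =>
    intro n hn
    by_cases h : n ≤ 1
    · rw [compute_nth_base n h, compute_nth_alt, dif_pos h]
    · have h2 : PySem.Int.floordiv n 2 = n / 2 := PySem.Int.floordiv_eq_ediv_of_pos (by omega)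
      have hih : compute_nth (PySem.Int.floordiv n 2) = compute_nth_alt (PySem.Int.floordiv n 2) := by
        apply ih; rw [h2]; omega
      rw [compute_nth_rec n (by omega), hih]
      conv_rhs => rw [compute_nth_alt, dif_neg h]

-- ===== VERDICT (by name: the statement is the Claim_ definition above) =====
theorem compute_nth_spec : Claim_equal_compute_nth := by
  intro n _
  exact main_aux n.toNat n le_rfl
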